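-- pv_equiv track=rewrite | github.com/peterdoyle1717/undented | src/clers.py | _regulate
-- ===== SOURCE A (Python) =====
-- def _regulate(poly):
--     """Relabel vertices 1..n in order of first appearance."""
--     label = {}
--     k = 0
--     out = []
--     for a, b, c in poly:
--         if a not in label:
--             k += 1; label[a] = k
--         if b not in label:
--             k += 1; label[b] = k
--         if c not in label:
--             k += 1; label[c] = k
--         out.append((label[a], label[b], label[c]))
--     return out
-- ===== SOURCE B (Python) =====
-- def _regulate(poly):
--     """Relabel vertices 1..n in order of first appearance: build the
--     first-occurrence index of every vertex by a single BACKWARD overwrite pass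
--     (no membership tests), then rank the distinct vertices by sorting on that
--     first index."""
--     flat = [v for t in poly for v in t]
--     first = {}
--     for i, v in reversed(list(enumerate(flat))):
--         first[v] = i                      # backward: the first occurrence wins
--     order = sorted(first, key=first.get)  # distinct vertices by first index
--     rank = {v: r + 1 for r, v in enumerate(order)}
--     return [(rank[a], rank[b], rank[c]) for a, b, c in poly]
-- ===== Notes on version B (the rewrite author's own statement) =====
-- stated objective: alternative
-- what changed: A assigns labels with an incremental counter and per-vertex membership tests in one fused loop; B instead builds the first-occurrence index map by a backward overwrite pass (no membership tests, no counter), sorts the distinct vertices by that first index to get their ranks, and maps each triangle through the rank table.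
import Mathlib
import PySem

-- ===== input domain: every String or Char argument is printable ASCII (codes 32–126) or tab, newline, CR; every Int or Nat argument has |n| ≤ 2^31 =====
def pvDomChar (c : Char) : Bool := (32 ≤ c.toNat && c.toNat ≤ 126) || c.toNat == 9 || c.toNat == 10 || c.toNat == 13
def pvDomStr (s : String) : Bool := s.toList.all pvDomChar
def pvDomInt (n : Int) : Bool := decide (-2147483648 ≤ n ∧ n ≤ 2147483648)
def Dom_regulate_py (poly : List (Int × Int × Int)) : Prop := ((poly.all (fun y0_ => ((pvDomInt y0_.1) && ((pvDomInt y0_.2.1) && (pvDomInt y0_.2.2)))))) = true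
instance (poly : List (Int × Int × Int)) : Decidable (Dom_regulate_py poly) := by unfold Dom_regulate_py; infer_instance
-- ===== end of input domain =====

-- A labels by an incremental counter with per-vertex membership tests in one fused loop;
-- B builds the first-occurrence index map by a backward overwrite pass, sorts the distinct
-- vertices by first index and maps every triangle through the resulting rank table (alternative decomposition).

-- ===== PORT A =====
-- A's loop state: (label dict, counter k, accumulated out); one step per triangle,
-- with the three membership-guarded insertions written out as in the source.
def regAStep (st : PySem.Dict Int Int × Int × List (Int × Int × Int))
    (t : Int × Int × Int) : PySem.Dict Int Int × Int × List (Int × Int × Int) :=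
  let (label, k, out) := st
  let (a, b, c) := t
  let (label, k) := if label.contains a then (label, k) else (label.insert a (k + 1), k + 1)
  let (label, k) := if label.contains b then (label, k) else (label.insert b (k + 1), k + 1)
  let (label, k) := if label.contains c then (label, k) else (label.insert c (k + 1), k + 1)
  -- label[a] etc.: the key is always present here, so getD 0 is exact
  (label, k, out ++ [(label.getD a 0, label.getD b 0, label.getD c 0)])

def regulate_py (poly : List (Int × Int × Int)) : List (Int × Int × Int) :=
  (poly.foldl regAStep (PySem.Dict.empty, 0, [])).2.2

-- ===== PORT B =====
def regulate_py_alt (poly : List (Int × Int × Int)) : List (Int × Int × Int) :=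
  let flat := poly.flatMap (fun t => [t.1, t.2.1, t.2.2])
  -- for i, v in reversed(list(enumerate(flat))): first[v] = i
  let first := ((PySem.List.enumerate flat).reverse).foldl
      (fun d (p : Int × Int) => d.insert p.2 p.1) PySem.Dict.empty
  -- sorted(first, key=first.get): every key is in first, so getD 0 is exact as the key
  let order := PySem.List.sorted first.keys (fun v => first.getD v 0) false
  -- rank = {v: r + 1 for r, v in enumerate(order)}
  let rank := (PySem.List.enumerate order).foldl
      (fun d (p : Int × Int) => d.insert p.2 (p.1 + 1)) PySem.Dict.empty
  -- rank[a] etc.: every vertex of poly is a key of rank, so getD 0 is exact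
  poly.map (fun t => (rank.getD t.1 0, rank.getD t.2.1 0, rank.getD t.2.2 0))

-- ===== PRECONDITION & SPEC =====
def Spec_regulate_py (poly : List (Int × Int × Int)) (out : List (Int × Int × Int)) : Prop := out = regulate_py_alt poly
instance (poly : List (Int × Int × Int)) (out : List (Int × Int × Int)) : Decidable (Spec_regulate_py poly out) := by unfold Spec_regulate_py; infer_instance

-- ===== CLAIM (what is proved, stated in full; the proofs are below) =====
def Claim_equal_regulate_py : Prop := ∀ (poly : List (Int × Int × Int)), Dom_regulate_py poly → Spec_regulate_py poly (regulate_py poly)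

-- ===== LEMMAS AND PROOFS =====

-- per-vertex step of A's labelling (proof-only view of regAStep's three guarded inserts)
def regBAdd (st : PySem.Dict Int Int × Int) (v : Int) : PySem.Dict Int Int × Int :=
  if st.1.contains v then st else (st.1.insert v (st.2 + 1), st.2 + 1)

-- first-occurrence index, as B's data uses it
def fidx (l : List Int) (v : Int) : Nat := (PySem.List.index? l v).getD 0

theorem regBAdd_present (st : PySem.Dict Int Int × Int) (v : Int) :
    ∃ x, (regBAdd st v).1.get? v = some x := by
  unfold regBAdd
  by_cases hc : st.1.contains v = true
  · have h2 := hc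
    rw [PySem.Dict.contains_eq_isSome_get?] at h2
    obtain ⟨x, hx⟩ := Option.isSome_iff_exists.mp h2
    exact ⟨x, by simp [hc, hx]⟩
  · exact ⟨st.2 + 1, by simp [hc, PySem.Dict.get?_insert_self]⟩

theorem regBAdd_persist (st : PySem.Dict Int Int × Int) (w v : Int) (x : Int)
    (h : st.1.get? v = some x) : (regBAdd st w).1.get? v = some x := by
  unfold regBAdd
  split
  · exact h
  · rename_i hc
    have hne : v ≠ w := by
      intro he; subst he
      rw [PySem.Dict.contains_eq_isSome_get?, h] at hc
      simp at hc
    simpa [PySem.Dict.get?_insert, hne] using h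

theorem foldl_regBAdd_persist (l : List Int) (st : PySem.Dict Int Int × Int) (v : Int) (x : Int)
    (h : st.1.get? v = some x) : (l.foldl regBAdd st).1.get? v = some x := by
  induction l generalizing st with
  | nil => exact h
  | cons w l ih => exact ih _ (regBAdd_persist st w v x h)

theorem foldB_persist (poly : List (Int × Int × Int)) (st : PySem.Dict Int Int × Int)
    (v : Int) (x : Int) (h : st.1.get? v = some x) :
    (poly.foldl (fun st t => [t.1, t.2.1, t.2.2].foldl regBAdd st) st).1.get? v = some x := by
  induction poly generalizing st with
  | nil => exact h
  | cons t rest ih => exact ih _ (foldl_regBAdd_persist _ st v x h)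

theorem regAStep_eq (st : PySem.Dict Int Int × Int) (out : List (Int × Int × Int))
    (t : Int × Int × Int) :
    regAStep (st.1, st.2, out) t =
      (([t.1, t.2.1, t.2.2].foldl regBAdd st).1, ([t.1, t.2.1, t.2.2].foldl regBAdd st).2,
       out ++ [(([t.1, t.2.1, t.2.2].foldl regBAdd st).1.getD t.1 0,
                ([t.1, t.2.1, t.2.2].foldl regBAdd st).1.getD t.2.1 0,
                ([t.1, t.2.1, t.2.2].foldl regBAdd st).1.getD t.2.2 0)]) := by
  obtain ⟨d, k⟩ := st
  obtain ⟨a, b, c⟩ := t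
  simp only [regAStep, regBAdd, List.foldl]

-- A's output = triangles mapped through the final label dict
theorem regulate_main (poly : List (Int × Int × Int)) (st : PySem.Dict Int Int × Int)
    (out : List (Int × Int × Int)) :
    (poly.foldl regAStep (st.1, st.2, out)).2.2 =
      out ++ poly.map (fun t =>
        (((poly.foldl (fun st t => [t.1, t.2.1, t.2.2].foldl regBAdd st) st).1).getD t.1 0,
         ((poly.foldl (fun st t => [t.1, t.2.1, t.2.2].foldl regBAdd st) st).1).getD t.2.1 0,
         ((poly.foldl (fun st t => [t.1, t.2.1, t.2.2].foldl regBAdd st) st).1).getD t.2.2 0)) := by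
  induction poly generalizing st out with
  | nil => simp
  | cons t rest ih =>
    set st' := [t.1, t.2.1, t.2.2].foldl regBAdd st with hst'
    have ha : ∃ x, st'.1.get? t.1 = some x := by
      obtain ⟨x, hx⟩ := regBAdd_present st t.1
      exact ⟨x, by simpa [hst', List.foldl] using
        regBAdd_persist _ t.2.2 _ x (regBAdd_persist _ t.2.1 _ x hx)⟩
    have hb : ∃ x, st'.1.get? t.2.1 = some x := by
      obtain ⟨x, hx⟩ := regBAdd_present (regBAdd st t.1) t.2.1
      exact ⟨x, by simpa [hst', List.foldl] using regBAdd_persist _ t.2.2 _ x hx⟩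
    have hc : ∃ x, st'.1.get? t.2.2 = some x := by
      obtain ⟨x, hx⟩ := regBAdd_present (regBAdd (regBAdd st t.1) t.2.1) t.2.2
      exact ⟨x, by simpa [hst', List.foldl] using hx⟩
    obtain ⟨xa, hxa⟩ := ha; obtain ⟨xb, hxb⟩ := hb; obtain ⟨xc, hxc⟩ := hc
    have hfa := foldB_persist rest st' t.1 xa hxa
    have hfb := foldB_persist rest st' t.2.1 xb hxb
    have hfc := foldB_persist rest st' t.2.2 xc hxc
    calc ((t :: rest).foldl regAStep (st.1, st.2, out)).2.2
        = (rest.foldl regAStep (st'.1, st'.2,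
            out ++ [(st'.1.getD t.1 0, st'.1.getD t.2.1 0, st'.1.getD t.2.2 0)])).2.2 := by
          rw [List.foldl_cons, regAStep_eq]
      _ = _ := by
          rw [ih st' (out ++ [(st'.1.getD t.1 0, st'.1.getD t.2.1 0, st'.1.getD t.2.2 0)])]
          simp only [hst', List.foldl] at hfa hfb hfc
          simp only [List.foldl_cons, List.map_cons, List.append_assoc,
            List.singleton_append]
          congr 2
          simp [PySem.Dict.getD_eq_get?_getD, hxa, hxb, hxc, hfa, hfb, hfc]

-- A's per-triangle fold over poly is the per-vertex fold over the flattened vertex list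
theorem foldA_eq_foldl_flat (poly : List (Int × Int × Int)) (st : PySem.Dict Int Int × Int) :
    poly.foldl (fun st t => [t.1, t.2.1, t.2.2].foldl regBAdd st) st =
      (poly.flatMap (fun t => [t.1, t.2.1, t.2.2])).foldl regBAdd st := by
  induction poly generalizing st with
  | nil => rfl
  | cons t r ih => rw [List.flatMap_cons, List.foldl_cons, List.foldl_append]; exact ih _

theorem ofList_append_singleton (l : List Int) (x : Int) :
    PySem.Set.ofList (l ++ [x]) = PySem.Set.add (PySem.Set.ofList l) x := by
  simp [PySem.Set.ofList_eq_foldl, List.foldl_append]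

-- A's per-vertex fold, characterised: the label of v is its index in the ordered dedup, +1
theorem regA_dict_char (l : List Int) :
    (∀ v, (l.foldl regBAdd (PySem.Dict.empty, 0)).1.get? v =
      (PySem.List.index? (PySem.Set.ofList l) v).map (fun k => (k : Int) + 1)) ∧
    (l.foldl regBAdd (PySem.Dict.empty, 0)).2 = ((PySem.Set.ofList l).length : Int) := by
  induction l using List.reverseRecOn with
  | nil => exact ⟨fun v => by simp [PySem.List.index?, PySem.Set.ofList, PySem.Dict.get?, PySem.Dict.empty], rfl⟩
  | append_singleton l x ih =>
    obtain ⟨ihg, ihk⟩ := ih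
    rw [List.foldl_append, List.foldl_cons, List.foldl_nil]
    by_cases hx : x ∈ l
    · have hmem : x ∈ PySem.Set.ofList l := (PySem.Set.mem_ofList l x).mpr hx
      have hsome : ((l.foldl regBAdd (PySem.Dict.empty, 0)).1.get? x).isSome := by
        rw [ihg x]
        obtain ⟨k, hk⟩ := Option.isSome_iff_exists.mp
          ((PySem.List.index?_isSome_iff (PySem.Set.ofList l) x).mpr hmem)
        rw [hk]; rfl
      have hc : (l.foldl regBAdd (PySem.Dict.empty, 0)).1.contains x = true := by
        rw [PySem.Dict.contains_eq_isSome_get?]; exact hsome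
      have hset : PySem.Set.ofList (l ++ [x]) = PySem.Set.ofList l := by
        rw [ofList_append_singleton]
        simp [PySem.Set.add, PySem.Set.contains, hmem]
      rw [regBAdd, if_pos hc, hset]
      exact ⟨ihg, ihk⟩
    · have hmem : x ∉ PySem.Set.ofList l := fun h => hx ((PySem.Set.mem_ofList l x).mp h)
      have hnone : (l.foldl regBAdd (PySem.Dict.empty, 0)).1.get? x = none := by
        rw [ihg x, (PySem.List.index?_eq_none_iff _ _).mpr hmem]; rfl
      have hc : (l.foldl regBAdd (PySem.Dict.empty, 0)).1.contains x = false := by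
        rw [PySem.Dict.contains_eq_isSome_get?, hnone]; rfl
      have hset : PySem.Set.ofList (l ++ [x]) = PySem.Set.ofList l ++ [x] := by
        rw [ofList_append_singleton]
        simp [PySem.Set.add, PySem.Set.contains, hmem]
      rw [regBAdd, if_neg (by simp [hc]), hset]
      constructor
      · intro v
        by_cases hv : v = x
        · subst hv
          rw [PySem.Dict.get?_insert_self, PySem.List.index?_append_singleton_self _ _ hmem,
            ihk]
          simp
        · rw [PySem.Dict.get?_insert_of_ne _ _ hv, ihg v]
          by_cases hvl : v ∈ PySem.Set.ofList l
          · rw [PySem.List.index?_append_of_mem _ hvl]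
          · rw [(PySem.List.index?_eq_none_iff _ _).mpr hvl,
              (PySem.List.index?_eq_none_iff _ _).mpr (by simp [hvl, hv])]
      · simp [ihk]

-- B's backward overwrite pass: the surviving value is the FIRST index
theorem first_get (l : List Int) (s : Int) (d : PySem.Dict Int Int) (v : Int) :
    (((PySem.List.enumerate l s).reverse).foldl
        (fun d (p : Int × Int) => d.insert p.2 p.1) d).get? v =
      match PySem.List.index? l v with
      | some k => some (s + (k : Int))
      | none => d.get? v := by
  induction l generalizing s d with
  | nil => simp [PySem.List.enumerate, PySem.List.index?]
  | cons x t ih =>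
    rw [PySem.List.enumerate_cons, List.reverse_cons, List.foldl_append]
    by_cases hv : v = x
    · subst hv
      rw [PySem.List.index?_cons_self]
      simp [PySem.Dict.get?_insert_self]
    · rw [PySem.List.index?_cons_of_ne _ (Ne.symm hv), List.foldl_cons, List.foldl_nil,
        PySem.Dict.get?_insert_of_ne _ _ hv, ih]
      cases h : PySem.List.index? t v with
      | none => simp
      | some k => simp; ring

theorem first_keys (l : List Int) :
    (((PySem.List.enumerate l 0).reverse).foldl
        (fun d (p : Int × Int) => d.insert p.2 p.1) PySem.Dict.empty).keys =
      PySem.Set.ofList l.reverse := by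
  have h := PySem.Dict.keys_foldl_insert_key (ν := Int) ((PySem.List.enumerate l 0).reverse)
      (fun (p : Int × Int) => p.2) (fun _ p => p.1) PySem.Dict.empty
  simp only at h
  rw [h, List.map_reverse, PySem.List.map_snd_enumerate]
  rfl

-- the ordered dedup is strictly increasing in first-occurrence index
theorem pairwise_fidx (l : List Int) :
    (PySem.Set.ofList l).Pairwise (fun a b => fidx l a < fidx l b) := by
  induction l using List.reverseRecOn with
  | nil => simp [PySem.Set.ofList]
  | append_singleton l x ih =>
    by_cases hx : x ∈ l
    · have hset : PySem.Set.ofList (l ++ [x]) = PySem.Set.ofList l := by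
        rw [ofList_append_singleton]
        simp [PySem.Set.add, PySem.Set.contains, (PySem.Set.mem_ofList l x).mpr hx]
      rw [hset]
      refine ih.imp_of_mem ?_
      intro a b ha hb hab
      have ha' := (PySem.Set.mem_ofList l a).mp ha
      have hb' := (PySem.Set.mem_ofList l b).mp hb
      unfold fidx
      rw [PySem.List.index?_append_of_mem _ ha', PySem.List.index?_append_of_mem _ hb']
      exact hab
    · have hmem : x ∉ PySem.Set.ofList l := fun h => hx ((PySem.Set.mem_ofList l x).mp h)
      have hset : PySem.Set.ofList (l ++ [x]) = PySem.Set.ofList l ++ [x] := by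
        rw [ofList_append_singleton]
        simp [PySem.Set.add, PySem.Set.contains, hmem]
      rw [hset, List.pairwise_append]
      refine ⟨ih.imp_of_mem ?_, List.pairwise_singleton _ _, ?_⟩
      · intro a b ha hb hab
        unfold fidx
        rw [PySem.List.index?_append_of_mem _ ((PySem.Set.mem_ofList l a).mp ha),
          PySem.List.index?_append_of_mem _ ((PySem.Set.mem_ofList l b).mp hb)]
        exact hab
      · intro a ha b hb
        rw [List.mem_singleton] at hb; subst hb
        have ha' := (PySem.Set.mem_ofList l a).mp ha
        unfold fidx
        rw [PySem.List.index?_append_of_mem _ ha', PySem.List.index?_append_singleton_self _ _ hx]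
        obtain ⟨k, hk⟩ := Option.isSome_iff_exists.mp ((PySem.List.index?_isSome_iff l a).mpr ha')
        obtain ⟨hlt, -, -⟩ := PySem.List.getElem_of_index?_eq_some hk
        rw [hk, Option.getD_some, Option.getD_some]
        exact hlt

-- B's sort re-creates the first-appearance order
theorem sorted_first_eq (l : List Int) :
    PySem.List.sorted
      (((PySem.List.enumerate l 0).reverse).foldl
          (fun d (p : Int × Int) => d.insert p.2 p.1) PySem.Dict.empty).keys
      (fun v => (((PySem.List.enumerate l 0).reverse).foldl
          (fun d (p : Int × Int) => d.insert p.2 p.1) PySem.Dict.empty).getD v 0) false =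
    PySem.Set.ofList l := by
  apply PySem.List.sorted_eq_of_perm_of_pairwise_lt
  · rw [first_keys]
    refine (List.perm_ext_iff_of_nodup (PySem.Set.nodup_ofList _) (PySem.Set.nodup_ofList _)).mpr ?_
    intro a
    rw [PySem.Set.mem_ofList, PySem.Set.mem_ofList, List.mem_reverse]
  · refine (pairwise_fidx l).imp_of_mem ?_
    intro a b ha hb hab
    have ha' := (PySem.Set.mem_ofList l a).mp ha
    have hb' := (PySem.Set.mem_ofList l b).mp hb
    obtain ⟨ka, hka⟩ := Option.isSome_iff_exists.mp ((PySem.List.index?_isSome_iff l a).mpr ha')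
    obtain ⟨kb, hkb⟩ := Option.isSome_iff_exists.mp ((PySem.List.index?_isSome_iff l b).mpr hb')
    rw [PySem.Dict.getD_eq_get?_getD, PySem.Dict.getD_eq_get?_getD, first_get, first_get,
      hka, hkb]
    have : fidx l a < fidx l b := hab
    rw [fidx, fidx, hka, hkb] at this
    simp only [Option.getD_some] at this ⊢
    omega

theorem foldl_insert_get_of_not_mem (e : List (Int × Int)) (d : PySem.Dict Int Int) (v : Int)
    (h : ∀ p ∈ e, p.2 ≠ v) :
    (e.foldl (fun d (p : Int × Int) => d.insert p.2 (p.1 + 1)) d).get? v = d.get? v := by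
  induction e generalizing d with
  | nil => rfl
  | cons p e ih =>
    rw [List.foldl_cons, ih _ (fun q hq => h q (List.mem_cons_of_mem _ hq)),
      PySem.Dict.get?_insert_of_ne _ _ (fun he => h p List.mem_cons_self he.symm)]

-- B's rank dict: rank of v = its index in order, +1
theorem rank_get (l : List Int) (hn : l.Nodup) (s : Int) (d : PySem.Dict Int Int) (v : Int)
    (hv : v ∈ l) :
    ((PySem.List.enumerate l s).foldl
        (fun d (p : Int × Int) => d.insert p.2 (p.1 + 1)) d).get? v =
      some (s + (fidx l v : Int) + 1) := by
  induction l generalizing s d with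
  | nil => cases hv
  | cons x t ih =>
    rw [PySem.List.enumerate_cons, List.foldl_cons]
    by_cases hvx : v = x
    · subst hvx
      have hnt : v ∉ t := (List.nodup_cons.mp hn).1
      have hne : ∀ p ∈ PySem.List.enumerate t (s + 1), (p : Int × Int).2 ≠ v := by
        intro p hp he
        have hp2 : p.2 ∈ t := by
          have hm := PySem.List.map_snd_enumerate t (s + 1)
          rw [← hm]
          exact List.mem_map_of_mem hp
        rw [he] at hp2; exact hnt hp2
      rw [foldl_insert_get_of_not_mem _ _ _ hne, PySem.Dict.get?_insert_self]
      have h0 : fidx (v :: t) v = 0 := by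
        unfold fidx; rw [PySem.List.index?_cons_self]; rfl
      rw [h0]
      norm_num
    · have hvt : v ∈ t := by cases List.mem_cons.mp hv with
        | inl h => exact absurd h hvx
        | inr h => exact h
      rw [ih (List.nodup_cons.mp hn).2 (s + 1) _ hvt]
      have : fidx (x :: t) v = fidx t v + 1 := by
        unfold fidx
        rw [PySem.List.index?_cons_of_ne _ (Ne.symm hvx)]
        obtain ⟨k, hk⟩ := Option.isSome_iff_exists.mp ((PySem.List.index?_isSome_iff t v).mpr hvt)
        rw [hk, Option.map_some, Option.getD_some, Option.getD_some]
      rw [this]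
      congr 1
      push_cast
      ring

-- ===== VERDICT (by name: the statement is the Claim_ definition above) =====
-- pointwise agreement of the two final lookup tables on every vertex of the input
theorem point_eq (flat : List Int) (v : Int) (hv : v ∈ flat) :
    (flat.foldl regBAdd (PySem.Dict.empty, 0)).1.getD v 0 =
      ((PySem.List.enumerate (PySem.List.sorted
          (((PySem.List.enumerate flat 0).reverse).foldl
              (fun d (p : Int × Int) => d.insert p.2 p.1) PySem.Dict.empty).keys
          (fun w => (((PySem.List.enumerate flat 0).reverse).foldl
              (fun d (p : Int × Int) => d.insert p.2 p.1) PySem.Dict.empty).getD w 0) false) 0).foldl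
        (fun d (p : Int × Int) => d.insert p.2 (p.1 + 1)) PySem.Dict.empty).getD v 0 := by
  rw [sorted_first_eq]
  have hv' : v ∈ PySem.Set.ofList flat := (PySem.Set.mem_ofList flat v).mpr hv
  obtain ⟨k, hk⟩ := Option.isSome_iff_exists.mp
    ((PySem.List.index?_isSome_iff (PySem.Set.ofList flat) v).mpr hv')
  have hA := (regA_dict_char flat).1 v
  rw [hk] at hA
  have hB := rank_get (PySem.Set.ofList flat) (PySem.Set.nodup_ofList flat) 0
      PySem.Dict.empty v hv'
  rw [PySem.Dict.getD_eq_get?_getD, PySem.Dict.getD_eq_get?_getD, hA, hB]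
  have : fidx (PySem.Set.ofList flat) v = k := by rw [fidx, hk]; rfl
  rw [this]
  simp

-- ===== VERDICT (by name: the statement is the Claim_ definition above) =====
theorem regulate_py_spec : Claim_equal_regulate_py := by
  intro poly _
  show regulate_py poly = regulate_py_alt poly
  have hmain := regulate_main poly (PySem.Dict.empty, 0) []
  rw [foldA_eq_foldl_flat] at hmain
  have hA : regulate_py poly =
      poly.map (fun t =>
        (((poly.flatMap (fun t => [t.1, t.2.1, t.2.2])).foldl regBAdd (PySem.Dict.empty, 0)).1.getD t.1 0,
         ((poly.flatMap (fun t => [t.1, t.2.1, t.2.2])).foldl regBAdd (PySem.Dict.empty, 0)).1.getD t.2.1 0,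
         ((poly.flatMap (fun t => [t.1, t.2.1, t.2.2])).foldl regBAdd (PySem.Dict.empty, 0)).1.getD t.2.2 0)) := by
    unfold regulate_py
    simpa using hmain
  rw [hA]
  unfold regulate_py_alt
  simp only []
  apply List.map_congr_left
  intro t ht
  have hmem : ∀ v ∈ ([t.1, t.2.1, t.2.2] : List Int),
      v ∈ poly.flatMap (fun t => [t.1, t.2.1, t.2.2]) := by
    intro v hv
    exact List.mem_flatMap.mpr ⟨t, ht, hv⟩
  rw [point_eq _ t.1 (hmem _ (by simp)), point_eq _ t.2.1 (hmem _ (by simp)),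
    point_eq _ t.2.2 (hmem _ (by simp))]
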